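-- pv_equiv track=rewrite | github.com/KMohan07/mohan-hackathon | qrng_backend.py | adaptive_proportion_test
-- ===== SOURCE A (Python) =====
-- def adaptive_proportion_test(bits: str, window: int, cutoff: int) -> bool:
--     if len(bits) < window or window <= 0:
--         return True
--     # Reference bit can be policy-chosen; here use '0' to be conservative in imbalance checks
--     ref = '0'
--     for i in range(0, len(bits) - window + 1, window):
--         block = bits[i:i+window]
--         if block.count(ref) >= cutoff:
--             return False
--     return True
-- ===== SOURCE B (Python) =====
-- def adaptive_proportion_test(bits: str, window: int, cutoff: int) -> bool:
--     # Single streaming pass: count zeros per window with a running counter,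
--     # no slicing and no per-block count() rescans.
--     if window <= 0 or len(bits) < window:
--         return True
--     zeros = 0
--     pos = 0
--     for ch in bits:
--         if ch == '0':
--             zeros += 1
--         pos += 1
--         if pos == window:
--             if zeros >= cutoff:
--                 return False
--             zeros = 0
--             pos = 0
--     return True
-- ===== Notes on version B (the rewrite author's own statement) =====
-- stated objective: alternative
-- what changed: Replaces the slice-and-count('0') pass over each window with a single streaming pass that keeps a running zero counter and window position, resetting at each window boundary.
import Mathlib
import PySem

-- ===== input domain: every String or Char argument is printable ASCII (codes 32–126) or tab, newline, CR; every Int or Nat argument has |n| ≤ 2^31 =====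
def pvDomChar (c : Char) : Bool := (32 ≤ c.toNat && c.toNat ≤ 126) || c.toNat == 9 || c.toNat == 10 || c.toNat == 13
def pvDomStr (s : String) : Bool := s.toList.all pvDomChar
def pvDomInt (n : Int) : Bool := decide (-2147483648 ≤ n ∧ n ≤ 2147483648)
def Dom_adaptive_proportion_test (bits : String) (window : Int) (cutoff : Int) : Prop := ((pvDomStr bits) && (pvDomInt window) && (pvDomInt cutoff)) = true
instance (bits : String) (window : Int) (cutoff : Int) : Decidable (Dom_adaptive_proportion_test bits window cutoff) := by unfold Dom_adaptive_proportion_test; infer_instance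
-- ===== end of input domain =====

-- B replaces A's per-window slice + count('0') rescan with one streaming pass
-- keeping a running zero counter and window position (alternative decomposition).

-- ===== PORT A =====
-- A's for-loop over range(0, len(bits)-window+1, window) with its early `return False`
def apA_loop (l : List Char) (window cutoff : Int) : List Int → Bool
  | [] => true
  | i :: rest =>
    let block := PySem.List.slice l (some i) (some (i + window))
    if cutoff ≤ (PySem.Chars.count block ['0'] : Int) then false
    else apA_loop l window cutoff rest

def adaptive_proportion_test (bits : String) (window : Int) (cutoff : Int) : Bool :=
  if PySem.Str.len bits < window ∨ window ≤ 0 then true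
  else apA_loop bits.toList window cutoff
        (PySem.List.pyRange 0 (PySem.Str.len bits - window + 1) window)

-- ===== PORT B =====
-- B's `for ch in bits` loop with running state (zeros, pos) and early `return False`
def apB_loop (window cutoff : Int) : List Char → Int → Int → Bool
  | [], _, _ => true
  | c :: rest, zeros, pos =>
    let z := if c = '0' then zeros + 1 else zeros
    let p := pos + 1
    if p = window then
      if cutoff ≤ z then false else apB_loop window cutoff rest 0 0
    else apB_loop window cutoff rest z p

def adaptive_proportion_test_alt (bits : String) (window : Int) (cutoff : Int) : Bool :=
  if window ≤ 0 ∨ PySem.Str.len bits < window then true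
  else apB_loop window cutoff bits.toList 0 0

-- ===== PRECONDITION & SPEC =====
def Spec_adaptive_proportion_test (bits : String) (window : Int) (cutoff : Int) (out : Bool) : Prop := out = adaptive_proportion_test_alt bits window cutoff
instance (bits : String) (window : Int) (cutoff : Int) (out : Bool) : Decidable (Spec_adaptive_proportion_test bits window cutoff out) := by unfold Spec_adaptive_proportion_test; infer_instance

-- ===== CLAIM (what is proved, stated in full; the proofs are below) =====
def Claim_equal_adaptive_proportion_test : Prop := ∀ (bits : String) (window : Int) (cutoff : Int), Dom_adaptive_proportion_test bits window cutoff → Spec_adaptive_proportion_test bits window cutoff (adaptive_proportion_test bits window cutoff)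

-- ===== LEMMAS AND PROOFS =====

-- common reference form both loops are reduced to: test each full w-sized chunk in turn
def chunkRec (w : Nat) (cutoff : Int) (l : List Char) : Bool :=
  if _h : l.length < w ∨ w = 0 then true
  else if cutoff ≤ ((l.take w).count '0' : Int) then false
  else chunkRec w cutoff (l.drop w)
termination_by l.length
decreasing_by simp only [List.length_drop]; omega

-- Python's str.count of a single character is List.count
lemma count_go_singleton (c : Char) : ∀ (fuel : Nat) (l : List Char) (acc : Nat),
    l.length ≤ fuel → PySem.Chars.count.go [c] fuel l acc = acc + l.count c := by
  intro fuel
  induction fuel with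
  | zero => intro l acc h; cases l with
    | nil => simp [PySem.Chars.count.go]
    | cons a t => simp at h
  | succ n ih =>
    intro l acc h
    cases l with
    | nil => simp [PySem.Chars.count.go]
    | cons a t =>
      rw [PySem.Chars.count.go]
      by_cases hc : a = c
      · subst hc
        simp only [List.isPrefixOf, BEq.rfl, Bool.true_and, if_pos]
        rw [ih _ _ (by simpa using h)]
        simp
        omega
      · have : ([c].isPrefixOf (a :: t)) = false := by
          simp [List.isPrefixOf]
          exact fun hh => hc (by simpa using hh.symm)
        rw [this]
        simp only [Bool.false_eq_true, if_false]
        rw [ih _ _ (by simpa using h)]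
        simp [hc]

lemma chars_count_singleton (l : List Char) (c : Char) :
    PySem.Chars.count l [c] = l.count c := by
  rw [PySem.Chars.count]
  simp only [List.isEmpty_cons, if_false, Bool.false_eq_true]
  rw [count_go_singleton c l.length l 0 le_rfl]
  omega

-- the k+1-st window of l is the k-th window of l.drop w
lemma slice_mul (l : List Char) (w k : Nat) :
    PySem.List.slice l (some ((w : Int) * ((k : Int) + 1))) (some ((w : Int) * ((k : Int) + 1) + (w : Int)))
      = PySem.List.slice (l.drop w) (some ((w : Int) * (k : Int))) (some ((w : Int) * (k : Int) + (w : Int))) := by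
  have e1 : (w : Int) * ((k : Int) + 1) = ((w * (k + 1) : Nat) : Int) := by push_cast; ring
  have e2 : (w : Int) * ((k : Int) + 1) + (w : Int) = ((w * (k + 1) + w : Nat) : Int) := by push_cast; ring
  have e3 : (w : Int) * (k : Int) = ((w * k : Nat) : Int) := by push_cast; ring
  have e4 : (w : Int) * (k : Int) + (w : Int) = ((w * k + w : Nat) : Int) := by push_cast; ring
  rw [e2, e1, e4, e3,
      PySem.List.slice_toNat _ (by positivity) (by positivity),
      PySem.List.slice_toNat _ (by positivity) (by positivity)]
  rw [List.drop_drop]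
  simp only [Int.toNat_natCast]
  rw [show w * k + w - w * k = w from by omega,
      show w * (k + 1) + w - w * (k + 1) = w from by omega,
      show w * (k + 1) = w * k + w from by ring]
  rw [Nat.add_comm (w * k) w]

lemma shiftA (w : Nat) (cutoff : Int) : ∀ (ks : List Nat) (l : List Char),
    apA_loop l (w : Int) cutoff (ks.map fun (k : Nat) => (w : Int) * ((k : Int) + 1))
      = apA_loop (l.drop w) (w : Int) cutoff (ks.map fun (k : Nat) => (w : Int) * (k : Int)) := by
  intro ks
  induction ks with
  | nil => intro l; rfl
  | cons k ks ih =>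
    intro l
    rw [List.map_cons, List.map_cons, apA_loop, apA_loop, slice_mul l w k, ih l]

-- A's index list range(0, L-w+1, w) is exactly the L/w multiples of w
lemma pyRangeChunks (w L : Nat) (hw : 0 < w) :
    PySem.List.pyRange 0 ((L : Int) - (w : Int) + 1) (w : Int)
      = (List.range (L / w)).map (fun (k : Nat) => (w : Int) * (k : Int)) := by
  rw [PySem.List.pyRange_of_pos 0 _ (by exact_mod_cast hw)]
  by_cases hLw : w ≤ L
  · rw [if_pos (by omega)]
    have h1 : ((L : Int) - (w : Int) + 1 - 0 + (w : Int) - 1) = (L : Int) := by ring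
    rw [h1, ← Int.natCast_ediv, Int.toNat_natCast]
    simp
  · rw [if_neg (by omega)]
    rw [Nat.div_eq_of_lt (by omega)]
    simp

lemma AeqChunk (w : Nat) (hw : 0 < w) (cutoff : Int) : ∀ (n : Nat) (l : List Char), l.length ≤ n →
    apA_loop l (w : Int) cutoff ((List.range (l.length / w)).map fun (k : Nat) => (w : Int) * (k : Int))
      = chunkRec w cutoff l := by
  intro n
  induction n with
  | zero =>
    intro l h
    have hl : l.length = 0 := by omega
    rw [hl, Nat.zero_div, List.range_zero, List.map_nil, chunkRec]
    rw [dif_pos (by omega)]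
    rfl
  | succ n ih =>
    intro l h
    by_cases hwl : w ≤ l.length
    · have hm : 0 < l.length / w := (Nat.one_le_div_iff hw).mpr hwl
      obtain ⟨m, hm'⟩ : ∃ m, l.length / w = m + 1 := ⟨l.length / w - 1, by omega⟩
      rw [hm', List.range_succ_eq_map, List.map_cons, apA_loop]
      have hslice : PySem.List.slice l (some 0) (some ((0 : Int) + (w : Int))) = l.take w := by
        rw [zero_add, PySem.List.slice_zero_start, PySem.List.slice_to _ (by positivity)]
        simp
      simp only [Nat.cast_zero, Int.mul_zero]
      rw [chunkRec, dif_neg (by omega)]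
      rw [hslice, chars_count_singleton]
      by_cases hc : cutoff ≤ ((l.take w).count '0' : Int)
      · simp only [if_pos hc]
      · simp only [if_neg hc]
        rw [List.map_map]
        have hcomp : ((fun (k : Nat) => (w : Int) * (k : Int)) ∘ Nat.succ)
            = fun (k : Nat) => (w : Int) * ((k : Int) + 1) := by
          funext k; simp only [Function.comp]; push_cast; ring
        rw [hcomp, shiftA w cutoff (List.range m) l]
        have hdiv : (l.drop w).length / w = m := by
          have h1 : (l.drop w).length = l.length - w := by simp
          rw [h1]
          have h2 := Nat.div_eq_sub_div hw hwl
          omega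
        have := ih (l.drop w) (by simp; omega)
        rw [hdiv] at this
        exact this
    · rw [Nat.div_eq_of_lt (by omega), List.range_zero, List.map_nil, chunkRec,
          dif_pos (by omega)]
      rfl

-- B's loop from mid-window state (z zeros seen, p chars into the window)
lemma Bstep (w : Nat) (cutoff : Int) : ∀ (l : List Char) (z : Int) (p : Nat), p < w →
    apB_loop (w : Int) cutoff l z (p : Int)
      = if l.length < w - p then true
        else if cutoff ≤ z + ((l.take (w - p)).count '0' : Int) then false
        else apB_loop (w : Int) cutoff (l.drop (w - p)) 0 0 := by
  intro l
  induction l with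
  | nil =>
    intro z p hp
    rw [if_pos (show ([] : List Char).length < w - p by simp; omega)]
    rfl
  | cons c rest ih =>
    intro z p hp
    have key : ∀ (t : List Char), z + ((List.count '0' (c :: t) : Nat) : Int)
        = (if c = '0' then z + 1 else z) + ((List.count '0' t : Nat) : Int) := by
      intro t
      by_cases hc : c = '0' <;> simp [hc] <;> push_cast <;> ring
    rw [apB_loop]
    by_cases hpw : p + 1 = w
    · rw [if_pos (by exact_mod_cast congrArg (Nat.cast : Nat → Int) hpw)]
      have hw1 : w - p = 1 := by omega
      rw [hw1,
          if_neg (show ¬ ((c :: rest).length < 1) by simp),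
          show (1 : Nat) = 0 + 1 from rfl, List.take_succ_cons, List.take_zero,
          List.drop_succ_cons, List.drop_zero, key]
      simp
    · rw [if_neg (show ¬ ((p : Int) + 1 = (w : Int)) by
          intro hh; exact hpw (by exact_mod_cast hh))]
      rw [show ((p : Int) + 1) = ((p + 1 : Nat) : Int) from by push_cast; ring]
      rw [ih _ (p + 1) (by omega)]
      have hsub : w - p = (w - (p + 1)) + 1 := by omega
      by_cases hlen : rest.length < w - (p + 1)
      · rw [if_pos hlen, if_pos (show (c :: rest).length < w - p by simp; omega)]
      · rw [if_neg hlen,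
            if_neg (show ¬ ((c :: rest).length < w - p) by simp; omega),
            hsub, List.take_succ_cons, List.drop_succ_cons, key]

lemma BeqChunk (w : Nat) (hw : 0 < w) (cutoff : Int) : ∀ (n : Nat) (l : List Char), l.length ≤ n →
    apB_loop (w : Int) cutoff l 0 0 = chunkRec w cutoff l := by
  intro n
  induction n with
  | zero =>
    intro l h
    have hl : l.length = 0 := by omega
    rw [List.eq_nil_of_length_eq_zero hl, chunkRec, dif_pos (by simp; omega)]
    rfl
  | succ n ih =>
    intro l h
    have hstep := Bstep w cutoff l 0 0 hw
    rw [Nat.cast_zero, Nat.sub_zero, zero_add] at hstep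
    rw [hstep, chunkRec]
    by_cases hlw : l.length < w
    · rw [if_pos hlw, dif_pos (Or.inl hlw)]
    · rw [if_neg hlw, dif_neg (by omega)]
      by_cases hc : cutoff ≤ ((l.take w).count '0' : Int)
      · rw [if_pos hc, if_pos hc]
      · rw [if_neg hc, if_neg hc]
        exact ih (l.drop w) (by simp; omega)

-- ===== VERDICT (by name: the statement is the Claim_ definition above) =====
theorem adaptive_proportion_test_spec : Claim_equal_adaptive_proportion_test := by
  intro bits window cutoff _
  unfold Spec_adaptive_proportion_test adaptive_proportion_test adaptive_proportion_test_alt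
  rw [PySem.Str.len_eq]
  by_cases h : (bits.toList.length : Int) < window ∨ window ≤ 0
  · rw [if_pos h, if_pos (by tauto)]
  · rw [if_neg h, if_neg (by tauto)]
    have hle : ¬ (bits.toList.length : Int) < window := fun hh => h (Or.inl hh)
    have hpos : ¬ window ≤ 0 := fun hh => h (Or.inr hh)
    obtain ⟨w, rfl⟩ : ∃ w : Nat, window = (w : Int) :=
      ⟨window.toNat, (Int.toNat_of_nonneg (by omega)).symm⟩
    have hw : 0 < w := by exact_mod_cast by omega
    rw [pyRangeChunks w bits.toList.length hw,
        AeqChunk w hw cutoff bits.toList.length bits.toList le_rfl,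
        BeqChunk w hw cutoff bits.toList.length bits.toList le_rfl]
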